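-- pv_equiv track=rewrite | github.com/Sbstyn/chess | chessbot/checkMove.py | pawnAttackEdgeCheck
-- ===== SOURCE A (Python) =====
-- def pawnAttackEdgeCheck(f):
--     fx = 0
--     for x in range(1, 9):
--         for y in range(0, 8):
--             if(f == x + y * 8):
--                 fx = x
--     if fx == 1:
--         return 1
--     if fx == 8:
--         return -1
--     else:
--         return 0
-- ===== SOURCE B (Python) =====
-- LEFT_EDGE = (1, 9, 17, 25, 33, 41, 49, 57)
-- RIGHT_EDGE = (8, 16, 24, 32, 40, 48, 56, 64)
--
-- def pawnAttackEdgeCheck(f):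
--     if f in LEFT_EDGE:
--         return 1
--     if f in RIGHT_EDGE:
--         return -1
--     return 0
-- ===== Notes on version B (the rewrite author's own statement) =====
-- stated objective: simpler
-- what changed: Replaces A's full-board double loop with a column accumulator by direct membership tests against two precomputed tables of edge board-indices, with no loop and no arithmetic.
import Mathlib
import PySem

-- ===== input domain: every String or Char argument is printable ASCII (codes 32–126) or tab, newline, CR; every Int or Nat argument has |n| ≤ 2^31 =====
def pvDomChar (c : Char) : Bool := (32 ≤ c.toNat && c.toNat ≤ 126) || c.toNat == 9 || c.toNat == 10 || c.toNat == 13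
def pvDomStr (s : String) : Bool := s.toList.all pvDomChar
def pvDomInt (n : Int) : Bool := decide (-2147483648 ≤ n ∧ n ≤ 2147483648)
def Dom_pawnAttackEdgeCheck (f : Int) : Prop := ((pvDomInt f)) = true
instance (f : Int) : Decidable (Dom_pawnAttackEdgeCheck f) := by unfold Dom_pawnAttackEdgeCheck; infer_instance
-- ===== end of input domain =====

-- B replaces A's 64-cell scan with an accumulator by membership tests against two
-- precomputed edge-index tables (objective: simpler).

-- ===== PORT A =====
-- for x in range(1,9): for y in range(0,8): if f == x+y*8: fx = x
def pawnAttackEdgeCheck (f : Int) : Int :=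
  let fx : Int := 0
  let fx := (PySem.List.pyRange 1 9 1).foldl (fun fx x =>
    (PySem.List.pyRange 0 8 1).foldl (fun fx y =>
      if f == x + y * 8 then x else fx) fx) fx
  if fx == 1 then 1
  else if fx == 8 then -1
  else 0

-- ===== PORT B =====
def leftEdge : List Int := [1, 9, 17, 25, 33, 41, 49, 57]
def rightEdge : List Int := [8, 16, 24, 32, 40, 48, 56, 64]

def pawnAttackEdgeCheck_alt (f : Int) : Int :=
  if f ∈ leftEdge then 1
  else if f ∈ rightEdge then -1
  else 0

-- ===== PRECONDITION & SPEC =====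
def Spec_pawnAttackEdgeCheck (f : Int) (out : Int) : Prop := out = pawnAttackEdgeCheck_alt f
instance (f : Int) (out : Int) : Decidable (Spec_pawnAttackEdgeCheck f out) := by unfold Spec_pawnAttackEdgeCheck; infer_instance

-- ===== CLAIM (what is proved, stated in full; the proofs are below) =====
def Claim_equal_pawnAttackEdgeCheck : Prop := ∀ (f : Int), Dom_pawnAttackEdgeCheck f → Spec_pawnAttackEdgeCheck f (pawnAttackEdgeCheck f)

-- ===== LEMMAS AND PROOFS =====

-- a foldl whose update condition never fires leaves the accumulator unchanged
theorem foldl_ite_skip (L : List Int) (acc : Int) (c : Int → Bool) (v : Int → Int)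
    (h : ∀ y ∈ L, c y = false) :
    L.foldl (fun a y => if c y then v y else a) acc = acc := by
  induction L generalizing acc with
  | nil => rfl
  | cons z t ih =>
    simp only [List.foldl, h z (List.mem_cons_self ..)]
    exact ih acc (fun y hy => h y (List.mem_cons_of_mem _ hy))

-- ===== VERDICT (by name: the statement is the Claim_ definition above) =====
theorem pawnAttackEdgeCheck_spec : Claim_equal_pawnAttackEdgeCheck := by
  intro f _
  unfold Spec_pawnAttackEdgeCheck
  by_cases h : 1 ≤ f ∧ f ≤ 64
  · obtain ⟨h1, h2⟩ := h
    interval_cases f <;> decide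
  · -- out of range: every cell test f == x + y*8 fails, so A's accumulator stays 0
    unfold pawnAttackEdgeCheck pawnAttackEdgeCheck_alt leftEdge rightEdge
    have hA : (PySem.List.pyRange 1 9 1).foldl (fun fx x =>
        (PySem.List.pyRange 0 8 1).foldl (fun fx y =>
          if f == x + y * 8 then x else fx) fx) 0 = 0 := by
      have := foldl_ite_skip (PySem.List.pyRange 1 9 1) 0
        (fun _ => false) (fun x => x) (fun _ _ => rfl)
      calc (PySem.List.pyRange 1 9 1).foldl (fun fx x =>
            (PySem.List.pyRange 0 8 1).foldl (fun fx y =>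
              if f == x + y * 8 then x else fx) fx) 0
          = (PySem.List.pyRange 1 9 1).foldl (fun fx _ => fx) 0 := by
            apply PySem.List.foldl_congr_mem
            intro fx x hx
            apply foldl_ite_skip
            intro y hy
            rw [PySem.List.mem_pyRange_one] at hx hy
            simp only [beq_eq_false_iff_ne, ne_eq]
            omega
        _ = 0 := PySem.List.foldl_ignore ..
    simp only [hA]
    norm_num
    split_ifs with h1 h2
    · rcases h1 with rfl | rfl | rfl | rfl | rfl | rfl | rfl | rfl <;> omega
    · rcases h2 with rfl | rfl | rfl | rfl | rfl | rfl | rfl | rfl <;> omega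
    · rfl
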